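-- pv_equiv track=rewrite | github.com/sanket-qp/IK | 7-Adhoc Problems/is_rotation_of_a_palindrome.py | is_rotation_of_a_palindrome
-- ===== SOURCE A (Python) =====
-- def is_palindrome(s, start_idx):
--     end_idx = start_idx - 1 if start_idx != 0 else len(s) - 1
--     while start_idx != end_idx:
--         # print "start: %s, end: %s, start_char: %s, end_char: %s" % (start_idx, end_idx, s[start_idx], s[end_idx])
--         if s[start_idx] != s[end_idx]:
--             return False
--
--         start_idx = (start_idx + 1) % len(s)
--         end_idx -= 1
--         if end_idx < 0:
--             end_idx = len(s) - 1
--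
--     return True
--
-- def is_rotation_of_a_palindrome(s):
--     start_idx = 0
--     while True:
--         if is_palindrome(s, start_idx):
--             # print "palindrome: [%s:%s]" % (start_idx, start_idx-1)
--             return True, start_idx, start_idx - 1
--         start_idx += 1
--         start_idx = start_idx % len(s)
--         if start_idx == 0:
--             break
--
--     return False, None, None
-- ===== SOURCE B (Python) =====
-- def is_rotation_of_a_palindrome(s):
--     n = len(s)
--     for i in range(n):
--         t = s[i:] + s[:i]
--         if t == t[::-1]:
--             return True, i, i - 1
--     return False, None, None
-- ===== Notes on version B (the rewrite author's own statement) =====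
-- stated objective: idiomatic
-- what changed: A walks two indices cyclically with modular arithmetic in a hand-written character loop (and can loop forever on even-length strings with a palindromic rotation); B builds each rotation by slicing and compares it with its reversal (t == t[::-1]), returning at the first rotation index that is a palindrome.
import Mathlib
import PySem

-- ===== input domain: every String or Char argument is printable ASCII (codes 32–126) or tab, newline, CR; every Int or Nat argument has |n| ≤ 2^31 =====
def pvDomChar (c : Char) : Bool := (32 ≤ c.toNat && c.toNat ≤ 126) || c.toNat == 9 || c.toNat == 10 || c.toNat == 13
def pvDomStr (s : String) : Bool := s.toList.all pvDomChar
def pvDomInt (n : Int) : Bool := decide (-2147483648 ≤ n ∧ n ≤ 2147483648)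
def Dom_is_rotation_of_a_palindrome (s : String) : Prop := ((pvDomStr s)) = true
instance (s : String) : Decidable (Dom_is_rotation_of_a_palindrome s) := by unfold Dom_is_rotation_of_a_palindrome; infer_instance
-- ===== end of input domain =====

-- B replaces A's hand-written cyclic two-pointer character loop by slicing each rotation and
-- comparing it with its reversal (t == t[::-1]); objective: idiomatic.

-- ===== PORT A =====
-- end_idx update: Python's `end_idx -= 1; if end_idx < 0: end_idx = n - 1` (end_idx stays in [0,n))
def pvDec (n e : Nat) : Nat := if e = 0 then n - 1 else e - 1

-- A's `while start_idx != end_idx` loop; fuel n (the loop may not terminate in Python — on even-length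
-- strings with a palindromic rotation — those inputs are excluded by Pre_; inside Pre_ the loop always
-- stops within n steps, proved below, so the fuel branch is never taken). Indices stay in [0,n), so
-- s[start_idx] / s[end_idx] are ported as getD (exact there).
def pvPalLoop (l : List Char) (n : Nat) : Nat → Nat → Nat → Bool
  | 0, _, _ => true
  | fuel+1, st, en =>
    if st = en then true
    else if l.getD st ' ' ≠ l.getD en ' ' then false
    else pvPalLoop l n fuel ((st + 1) % n) (pvDec n en)

-- is_palindrome(s, start_idx): end_idx = start_idx - 1 if start_idx != 0 else len(s) - 1 (= pvDec n start_idx)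
def pvIsPalA (l : List Char) (st : Nat) : Bool :=
  pvPalLoop l l.length l.length st (pvDec l.length st)

-- outer `while True` loop: start_idx = 0, 1, …, breaks when (start_idx+1) % n wraps to 0 — at most n rounds
def pvSearchA (l : List Char) (n : Nat) : Nat → Nat → Bool × Option Int × Option Int
  | 0, _ => (false, none, none)
  | cnt+1, i =>
    if pvIsPalA l i then (true, some (i : Int), some ((i : Int) - 1))
    else pvSearchA l n cnt ((i + 1) % n)

def is_rotation_of_a_palindrome (s : String) : Bool × Option Int × Option Int :=
  pvSearchA s.toList s.toList.length s.toList.length 0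

-- ===== PORT B =====
-- for i in range(n): t = s[i:] + s[:i]; if t == t[::-1]: return True, i, i-1   (t[::-1] is List.reverse)
def pvSearchB (l : List Char) : List Int → Bool × Option Int × Option Int
  | [] => (false, none, none)
  | i :: rest =>
    let t := PySem.List.slice l (some i) none ++ PySem.List.slice l none (some i)
    if t = t.reverse then (true, some i, some (i - 1))
    else pvSearchB l rest

def is_rotation_of_a_palindrome_alt (s : String) : Bool × Option Int × Option Int :=
  pvSearchB s.toList (PySem.List.pyRange 0 (s.toList.length : Int) 1)

-- ===== PRECONDITION & SPEC =====
def pvRot (l : List Char) (i : Nat) : List Char := l.drop i ++ l.take i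

-- Pre_ excludes the empty string (A reads s[0] and raises IndexError) and even-length strings having a
-- palindromic rotation (A's two cyclic pointers can never meet on even length, so its inner loop runs forever).
def Pre_is_rotation_of_a_palindrome (s : String) : Prop :=
  s.toList ≠ [] ∧
    (s.toList.length % 2 = 1 ∨
      ∀ i < s.toList.length, pvRot s.toList i ≠ (pvRot s.toList i).reverse)
instance (s : String) : Decidable (Pre_is_rotation_of_a_palindrome s) := by
  unfold Pre_is_rotation_of_a_palindrome; infer_instance

def pvWitness_is_rotation_of_a_palindrome : String := "aab"

def Spec_is_rotation_of_a_palindrome (s : String) (out : Bool × Option Int × Option Int) : Prop := out = is_rotation_of_a_palindrome_alt s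
instance (s : String) (out : Bool × Option Int × Option Int) : Decidable (Spec_is_rotation_of_a_palindrome s out) := by unfold Spec_is_rotation_of_a_palindrome; infer_instance

-- ===== CLAIM (what is proved, stated in full; the proofs are below) =====
def Claim_equal_is_rotation_of_a_palindrome : Prop := ∀ (s : String), Dom_is_rotation_of_a_palindrome s → Pre_is_rotation_of_a_palindrome s → Spec_is_rotation_of_a_palindrome s (is_rotation_of_a_palindrome s)

-- ===== LEMMAS AND PROOFS =====

-- the end pointer's orbit: k applications of pvDec
def pvEnOrb (n en k : Nat) : Nat := (en + k * (n - 1)) % n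

lemma pvDec_eq_mod {n e : Nat} (hn : 0 < n) (he : e < n) : pvDec n e = (e + (n - 1)) % n := by
  unfold pvDec
  rcases Nat.eq_zero_or_pos e with h | h
  · subst h; simp [Nat.mod_eq_of_lt (by omega)]
  · rw [if_neg (by omega)]
    have : e + (n - 1) = (e - 1) + n := by omega
    rw [this, Nat.add_mod_right, Nat.mod_eq_of_lt (by omega)]

lemma pvEnOrb_dec {n en : Nat} (hn : 0 < n) (hen : en < n) (k : Nat) :
    pvEnOrb n (pvDec n en) k = pvEnOrb n en (k + 1) := by
  unfold pvEnOrb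
  rw [pvDec_eq_mod hn hen, Nat.mod_add_mod]
  ring_nf

-- the loop returns true when the pointers meet at step m with all earlier checks passing
lemma pvPalLoop_true (l : List Char) {n : Nat} (hn : 0 < n) :
    ∀ (m fuel st en : Nat), st < n → en < n → m < fuel →
      (st + m) % n = pvEnOrb n en m →
      (∀ k < m, (st + k) % n ≠ pvEnOrb n en k) →
      (∀ k < m, l.getD ((st + k) % n) ' ' = l.getD (pvEnOrb n en k) ' ') →
      pvPalLoop l n fuel st en = true := by
  intro m
  induction m with
  | zero =>
    intro fuel st en hst hen hf hmeet _ _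
    obtain ⟨f, rfl⟩ := Nat.exists_eq_succ_of_ne_zero (by omega : fuel ≠ 0)
    have : st = en := by
      have h1 : (st + 0) % n = st := by rw [Nat.add_zero, Nat.mod_eq_of_lt hst]
      have h2 : pvEnOrb n en 0 = en := by unfold pvEnOrb; simp [Nat.mod_eq_of_lt hen]
      rw [h1, h2] at hmeet; exact hmeet
    simp [pvPalLoop, this]
  | succ m ih =>
    intro fuel st en hst hen hf hmeet hne heq
    obtain ⟨f, rfl⟩ := Nat.exists_eq_succ_of_ne_zero (by omega : fuel ≠ 0)
    have hse : st ≠ en := by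
      have := hne 0 (by omega)
      simpa [Nat.mod_eq_of_lt hst, pvEnOrb, Nat.mod_eq_of_lt hen] using this
    have hch : l.getD st ' ' = l.getD en ' ' := by
      have := heq 0 (by omega)
      simpa [Nat.mod_eq_of_lt hst, pvEnOrb, Nat.mod_eq_of_lt hen] using this
    rw [pvPalLoop, if_neg hse, if_neg (not_not_intro hch)]
    have hdec : pvDec n en < n := by unfold pvDec; split <;> omega
    apply ih f ((st + 1) % n) (pvDec n en) (Nat.mod_lt _ hn) hdec (by omega)
    · rw [Nat.mod_add_mod, pvEnOrb_dec hn hen]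
      have : st + 1 + m = st + (m + 1) := by ring
      rw [this]; exact hmeet
    · intro k hk
      rw [Nat.mod_add_mod, pvEnOrb_dec hn hen]
      have : st + 1 + k = st + (k + 1) := by ring
      rw [this]; exact hne (k + 1) (by omega)
    · intro k hk
      rw [Nat.mod_add_mod, pvEnOrb_dec hn hen]
      have : st + 1 + k = st + (k + 1) := by ring
      rw [this]; exact heq (k + 1) (by omega)

-- the loop returns false when the first failing check is at step m, reached before any meeting
lemma pvPalLoop_false (l : List Char) {n : Nat} (hn : 0 < n) :
    ∀ (m fuel st en : Nat), st < n → en < n → m < fuel →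
      l.getD ((st + m) % n) ' ' ≠ l.getD (pvEnOrb n en m) ' ' →
      (∀ k, k ≤ m → (st + k) % n ≠ pvEnOrb n en k) →
      (∀ k < m, l.getD ((st + k) % n) ' ' = l.getD (pvEnOrb n en k) ' ') →
      pvPalLoop l n fuel st en = false := by
  intro m
  induction m with
  | zero =>
    intro fuel st en hst hen hf hmis hne _
    obtain ⟨f, rfl⟩ := Nat.exists_eq_succ_of_ne_zero (by omega : fuel ≠ 0)
    have hse : st ≠ en := by
      have := hne 0 (by omega)
      simpa [Nat.mod_eq_of_lt hst, pvEnOrb, Nat.mod_eq_of_lt hen] using this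
    have hch : l.getD st ' ' ≠ l.getD en ' ' := by
      have := hmis
      simpa [Nat.mod_eq_of_lt hst, pvEnOrb, Nat.mod_eq_of_lt hen] using this
    rw [pvPalLoop, if_neg hse, if_pos hch]
  | succ m ih =>
    intro fuel st en hst hen hf hmis hne heq
    obtain ⟨f, rfl⟩ := Nat.exists_eq_succ_of_ne_zero (by omega : fuel ≠ 0)
    have hse : st ≠ en := by
      have := hne 0 (by omega)
      simpa [Nat.mod_eq_of_lt hst, pvEnOrb, Nat.mod_eq_of_lt hen] using this
    have hch : l.getD st ' ' = l.getD en ' ' := by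
      have := heq 0 (by omega)
      simpa [Nat.mod_eq_of_lt hst, pvEnOrb, Nat.mod_eq_of_lt hen] using this
    rw [pvPalLoop, if_neg hse, if_neg (not_not_intro hch)]
    have hdec : pvDec n en < n := by unfold pvDec; split <;> omega
    apply ih f ((st + 1) % n) (pvDec n en) (Nat.mod_lt _ hn) hdec (by omega)
    · rw [Nat.mod_add_mod, pvEnOrb_dec hn hen]
      have : st + 1 + m = st + (m + 1) := by ring
      rw [this]; exact hmis
    · intro k hk
      rw [Nat.mod_add_mod, pvEnOrb_dec hn hen]
      have : st + 1 + k = st + (k + 1) := by ring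
      rw [this]; exact hne (k + 1) (by omega)
    · intro k hk
      rw [Nat.mod_add_mod, pvEnOrb_dec hn hen]
      have : st + 1 + k = st + (k + 1) := by ring
      rw [this]; exact heq (k + 1) (by omega)

-- the orbit of the initial end pointer, in closed form
lemma pvEnOrb_init {n i k : Nat} (hn : 0 < n) (hi : i < n) (hk : k < n) :
    pvEnOrb n (pvDec n i) k = (i + (n - 1 - k)) % n := by
  unfold pvEnOrb
  rw [pvDec_eq_mod hn hi, Nat.mod_add_mod]
  have h1 : k * (n - 1) + k = k * n := by
    have h2 : n - 1 + 1 = n := by omega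
    calc k * (n - 1) + k = k * (n - 1 + 1) := (Nat.mul_succ k (n - 1)).symm
      _ = k * n := by rw [h2]
  have h3 : i + (n - 1) + k * (n - 1) = i + (n - 1 - k) + k * n := by omega
  rw [h3, Nat.add_mul_mod_self_right]

lemma pvRot_length {l : List Char} {i : Nat} (hi : i ≤ l.length) :
    (pvRot l i).length = l.length := by
  unfold pvRot; simp; omega

lemma pvRot_getD {l : List Char} {i k : Nat} (hi : i < l.length) (hk : k < l.length) :
    (pvRot l i).getD k ' ' = l.getD ((i + k) % l.length) ' ' := by
  unfold pvRot
  by_cases h : k < l.length - i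
  · rw [List.getD_eq_getElem _ _ (by simp; omega)]
    rw [List.getElem_append_left (by simp; omega)]
    rw [List.getElem_drop]
    rw [List.getD_eq_getElem _ _ (by rw [Nat.mod_eq_of_lt (by omega)]; omega)]
    congr 1
    rw [Nat.mod_eq_of_lt (by omega)]
  · rw [List.getD_eq_getElem _ _ (by simp; omega)]
    rw [List.getElem_append_right (by simp; omega)]
    simp only [List.getElem_take, List.length_drop]
    rw [List.getD_eq_getElem _ _ (Nat.mod_lt _ (by omega))]
    congr 1
    have h2 : i + k = (k - (l.length - i)) + l.length := by omega
    rw [h2, Nat.add_mod_right, Nat.mod_eq_of_lt (by omega)]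

-- palindromicity as a pointwise condition
lemma pvPal_iff {l : List Char} {i : Nat} (hi : i < l.length) :
    (pvRot l i = (pvRot l i).reverse) ↔
      ∀ k < l.length, (pvRot l i).getD k ' ' = (pvRot l i).getD (l.length - 1 - k) ' ' := by
  set r := pvRot l i with hr
  have hlen : r.length = l.length := pvRot_length (le_of_lt hi)
  constructor
  · intro hpal k hk
    conv_lhs => rw [hpal]
    rw [List.getD_eq_getElem _ _ (by simp [hlen]; omega),
        List.getD_eq_getElem _ _ (by omega)]
    rw [List.getElem_reverse]
    congr 1
    omega
  · intro h
    apply List.ext_getElem (by simp)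
    intro k h1 h2
    have hk : k < l.length := by omega
    have := h k hk
    rw [List.getD_eq_getElem _ _ (by omega), List.getD_eq_getElem _ _ (by omega)] at this
    rw [this, List.getElem_reverse]
    congr 1
    omega

-- cancel a common left summand under equal residues
lemma pvMod_cancel {n i a b : Nat} (ha : a < n) (hb : b < n)
    (h : (i + a) % n = (i + b) % n) : a = b := by
  have h1 : a ≡ b [MOD n] := Nat.ModEq.add_left_cancel (Nat.ModEq.refl i) h
  have := Nat.ModEq.eq_of_lt_of_lt h1 ha hb
  exact this

-- A's inner check returns false whenever the rotation is not a palindrome (any length)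
lemma pvIsPalA_false {l : List Char} {i : Nat} (hi : i < l.length)
    (hnp : pvRot l i ≠ (pvRot l i).reverse) : pvIsPalA l i = false := by
  set n := l.length with hnd
  have hn : 0 < n := by omega
  set r := pvRot l i with hr
  have hPex : ∃ k, k < n ∧ r.getD k ' ' ≠ r.getD (n - 1 - k) ' ' := by
    by_contra hcon
    push_neg at hcon
    exact hnp ((pvPal_iff hi).mpr (fun k hk => hcon k hk))
  set k0 := Nat.find hPex with hk0d
  have hspec := Nat.find_spec hPex
  rw [← hk0d] at hspec
  obtain ⟨hk0n, hk0mis⟩ := hspec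
  have hmin : ∀ k, k < k0 → k < n → r.getD k ' ' = r.getD (n - 1 - k) ' ' := by
    intro k hk hkn
    by_contra hne
    exact Nat.find_min hPex (hk0d ▸ hk) ⟨hkn, hne⟩
  -- the mismatch pairs are symmetric under k ↦ n-1-k, so the least one lies strictly below the middle
  have hsym : 2 * k0 + 1 < n := by
    rcases Nat.lt_or_ge (2 * k0 + 1) n with h | h
    · exact h
    · exfalso
      rcases Nat.eq_or_lt_of_le h with heqn | hgt
      · have he : n - 1 - k0 = k0 := by omega
        exact hk0mis (by rw [he])
      · have hplt : n - 1 - k0 < k0 := by omega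
        have hp2 := hmin (n - 1 - k0) hplt (by omega)
        have he2 : n - 1 - (n - 1 - k0) = k0 := by omega
        rw [he2] at hp2
        exact hk0mis hp2.symm
  -- run the loop to the first mismatch, at step k0
  unfold pvIsPalA
  rw [← hnd]
  have hdec : pvDec n i < n := by unfold pvDec; split <;> omega
  apply pvPalLoop_false l hn k0 n i (pvDec n i) hi hdec (by omega)
  · rw [pvEnOrb_init hn hi (by omega)]
    rw [← pvRot_getD hi hk0n, ← pvRot_getD hi (by omega : n - 1 - k0 < l.length)]
    exact hk0mis
  · intro k hk
    rw [pvEnOrb_init hn hi (by omega)]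
    intro hcontra
    have := pvMod_cancel (n := n) (i := i) (by omega : k < n) (by omega : n - 1 - k < n) hcontra
    omega
  · intro k hk
    rw [pvEnOrb_init hn hi (by omega)]
    rw [← pvRot_getD hi (by omega : k < l.length), ← pvRot_getD hi (by omega : n - 1 - k < l.length)]
    exact hmin k hk (by omega)

-- A's inner check returns true on palindromic rotations of odd-length strings
lemma pvIsPalA_true {l : List Char} {i : Nat} (hodd : l.length % 2 = 1) (hi : i < l.length)
    (hp : pvRot l i = (pvRot l i).reverse) : pvIsPalA l i = true := by
  set n := l.length with hnd
  have hn : 0 < n := by omega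
  obtain ⟨m, hm⟩ : ∃ m, n = 2 * m + 1 := ⟨n / 2, by omega⟩
  have hall := (pvPal_iff hi).mp hp
  unfold pvIsPalA
  rw [← hnd]
  have hdec : pvDec n i < n := by unfold pvDec; split <;> omega
  apply pvPalLoop_true l hn m n i (pvDec n i) hi hdec (by omega)
  · rw [pvEnOrb_init hn hi (by omega)]
    congr 2
    omega
  · intro k hk
    rw [pvEnOrb_init hn hi (by omega)]
    intro hcontra
    have := pvMod_cancel (n := n) (i := i) (by omega : k < n) (by omega : n - 1 - k < n) hcontra
    omega
  · intro k hk
    rw [pvEnOrb_init hn hi (by omega)]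
    rw [← pvRot_getD hi (by omega), ← pvRot_getD hi (by omega)]
    exact hall k (by omega)

-- the two searches agree step by step, given that A's per-index check decides palindromicity
lemma pvSearch_agree (l : List Char) (_hn : 0 < l.length)
    (hpal : ∀ i < l.length, pvIsPalA l i = decide (pvRot l i = (pvRot l i).reverse)) :
    ∀ (cnt j : Nat), j + cnt = l.length →
      pvSearchA l l.length cnt j =
        pvSearchB l (PySem.List.pyRange (j : Int) (l.length : Int) 1) := by
  intro cnt
  induction cnt with
  | zero =>
    intro j hj
    have : PySem.List.pyRange (j : Int) (l.length : Int) 1 = [] := by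
      simp [PySem.List.pyRange]
      omega
    rw [this]
    rfl
  | succ cnt ih =>
    intro j hj
    have hjlt : j < l.length := by omega
    rw [PySem.List.pyRange_one_cons (by exact_mod_cast hjlt)]
    rw [pvSearchA, pvSearchB]
    have hslice :
        PySem.List.slice l (some (j : Int)) none ++ PySem.List.slice l none (some (j : Int)) =
          pvRot l j := by
      rw [PySem.List.slice_from_natCast, PySem.List.slice_to_natCast]
      rfl
    rw [hpal j hjlt]
    simp only [hslice]
    by_cases hp : pvRot l j = (pvRot l j).reverse
    · rw [if_pos (by exact decide_eq_true hp), if_pos hp]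
    · rw [if_neg (by simp [hp]), if_neg hp]
      rcases Nat.eq_zero_or_pos cnt with hc | hc
      · subst hc
        have hjn : j + 1 = l.length := by omega
        have : ((j : Int) + 1) = (l.length : Int) := by exact_mod_cast congrArg Nat.cast hjn
        rw [this]
        have hnil : PySem.List.pyRange (l.length : Int) (l.length : Int) 1 = [] := by
          simp [PySem.List.pyRange]
        rw [hnil]
        rfl
      · have hmod : (j + 1) % l.length = j + 1 := Nat.mod_eq_of_lt (by omega)
        rw [hmod]
        have hcast : ((j : Int) + 1) = (((j + 1 : Nat)) : Int) := by push_cast; ring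
        rw [hcast]
        exact ih (j + 1) (by omega)

-- ===== VERDICT (by name: the statement is the Claim_ definition above) =====
theorem is_rotation_of_a_palindrome_spec : Claim_equal_is_rotation_of_a_palindrome := by
  intro s _ hpre
  obtain ⟨hnil, hcase⟩ := hpre
  unfold Spec_is_rotation_of_a_palindrome
  unfold is_rotation_of_a_palindrome is_rotation_of_a_palindrome_alt
  have hn : 0 < s.toList.length := List.length_pos_of_ne_nil hnil
  have hpal : ∀ i < s.toList.length,
      pvIsPalA s.toList i = decide (pvRot s.toList i = (pvRot s.toList i).reverse) := by
    intro i hi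
    by_cases hp : pvRot s.toList i = (pvRot s.toList i).reverse
    · rcases hcase with hodd | hnone
      · rw [pvIsPalA_true hodd hi hp, decide_eq_true hp]
      · exact absurd hp (hnone i hi)
    · rw [pvIsPalA_false hi hp]
      simp [hp]
  exact pvSearch_agree s.toList hn hpal s.toList.length 0 (by omega)
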